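-- pv_equiv track=rewrite | github.com/hanjungwoo1/CodingTest | programmers/Level 2/[1]차 프렌즈4블록.py | compress_board
-- ===== SOURCE A (Python) =====
-- def compress_board(board: list, map_board: list):
--     m = len(board)
--     n = len(board[0])
--
--     for i in range(m):
--         for j in range(n):
--             if map_board[i][j] == 1:
--
--                 if i == 0:
--                     board[i][j] = "X"
--                 else:
--                     x = i
--                     while x > 0:
--                         board[x][j] = board[x - 1][j]
--                         board[x - 1][j] = "X"
--                         x -= 1
--
--     return board
-- ===== SOURCE B (Python) =====
-- # Column-wise single pass: for each column collect unmarked values, pad with "X" on top,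
-- # then rebuild the rows. Returns a new board (A mutates `board` in place; return value equal).
-- def compress_board(board: list, map_board: list):
--     m = len(board)
--     n = len(board[0])
--     cols = []
--     for j in range(n):
--         kept = [board[i][j] for i in range(m) if map_board[i][j] != 1]
--         cols.append(["X"] * (m - len(kept)) + kept)
--     return [[cols[j][i] for j in range(n)] for i in range(m)]
-- ===== Notes on version B (the rewrite author's own statement) =====
-- stated objective: alternative
-- what changed: Instead of shifting the whole column down one cell at a time for every marked cell (a cascading in-place shift, quadratic in the row count), B makes a single pass per column collecting the unmarked values, pads them with 'X' on top, and rebuilds the rows; B returns a new board while A mutates its argument (return values equal).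
-- outside the precondition, e.g. on compress_board([[], ['']], [[], [0]]): A returns [[], ['']], B returns [[], []]
import Mathlib
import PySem

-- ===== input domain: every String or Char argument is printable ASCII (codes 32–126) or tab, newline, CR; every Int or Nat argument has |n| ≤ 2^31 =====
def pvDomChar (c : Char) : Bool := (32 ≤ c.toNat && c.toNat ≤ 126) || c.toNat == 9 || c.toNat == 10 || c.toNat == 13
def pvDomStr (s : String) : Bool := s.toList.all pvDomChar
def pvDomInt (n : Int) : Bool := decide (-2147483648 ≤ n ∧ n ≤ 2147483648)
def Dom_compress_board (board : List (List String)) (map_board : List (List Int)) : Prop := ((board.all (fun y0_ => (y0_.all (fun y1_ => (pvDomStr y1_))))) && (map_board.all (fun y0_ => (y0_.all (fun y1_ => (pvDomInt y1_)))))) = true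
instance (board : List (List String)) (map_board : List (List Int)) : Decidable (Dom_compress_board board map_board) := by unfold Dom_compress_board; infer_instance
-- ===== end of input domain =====

-- B compacts each column in one pass (unmarked values at the bottom, "X"-padding on top) instead
-- of A's per-marked-cell cascading shift; A mutates `board` in place while B builds a new board,
-- so the equivalence proved here is about the return value.

-- ===== PORT A =====
-- board[i][j] read (in-range under Pre_; Python raises out of range, here a default)
def pvGetCell (b : List (List String)) (i j : Nat) : String := (b.getD i []).getD j ""
-- board[i][j] = v
def pvSetCell (b : List (List String)) (i j : Nat) (v : String) : List (List String) :=
  b.set i ((b.getD i []).set j v)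
-- the `while x > 0` loop of A, on column j, starting at x
def pvShift (j : Nat) : Nat → List (List String) → List (List String)
  | 0, b => b
  | x+1, b =>
      let b1 := pvSetCell b (x+1) j (pvGetCell b x j)
      let b2 := pvSetCell b1 x j "X"
      pvShift j x b2
-- body of the double loop for one cell (i, j)
def pvCellStep (mb : List (List Int)) (i j : Nat) (b : List (List String)) : List (List String) :=
  if (mb.getD i []).getD j 0 = 1 then
    if i = 0 then pvSetCell b 0 j "X" else pvShift j i b
  else b

def compress_board (board : List (List String)) (map_board : List (List Int)) : List (List String) :=
  let m := board.length
  let n := board.headI.length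
  (List.range m).foldl
    (fun b i => (List.range n).foldl (fun b j => pvCellStep map_board i j b) b) board

-- ===== PORT B =====
-- kept = [board[i][j] for i in range(m) if map_board[i][j] != 1]
def pvAltKept (board : List (List String)) (mb : List (List Int)) (m j : Nat) : List String :=
  ((List.range m).filter (fun i => (mb.getD i []).getD j 0 ≠ 1)).map
    (fun i => (board.getD i []).getD j "")

def compress_board_alt (board : List (List String)) (map_board : List (List Int)) : List (List String) :=
  let m := board.length
  let n := board.headI.length
  let cols := (List.range n).map (fun j =>
    let kept := pvAltKept board map_board m j
    List.replicate (m - kept.length) "X" ++ kept)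
  (List.range m).map (fun i => (List.range n).map (fun j => (cols.getD j []).getD i ""))

-- ===== PRECONDITION & SPEC =====
-- Pre_ excludes the empty board and mismatched shapes: A raises IndexError when board is empty,
-- when map_board has fewer rows than board or one of those rows is shorter than row 0 of board,
-- or when a shift reaches a board row shorter than row 0; and on ragged boards whose rows are
-- LONGER than row 0, A returns the extra cells untouched only as an artefact of its in-place
-- mutation (see cites), so rows must all have the length of row 0.
def Pre_compress_board (board : List (List String)) (map_board : List (List Int)) : Prop :=
  board ≠ [] ∧
  (∀ r ∈ board, r.length = board.headI.length) ∧
  board.length ≤ map_board.length ∧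
  (∀ r ∈ map_board.take board.length, board.headI.length ≤ r.length)
instance (board : List (List String)) (map_board : List (List Int)) : Decidable (Pre_compress_board board map_board) := by unfold Pre_compress_board; infer_instance

def pvWitness_compress_board : List (List String) × List (List Int) :=
  ([["a", "b"], ["c", "d"]], [[1, 0], [0, 1]])

def Spec_compress_board (board : List (List String)) (map_board : List (List Int)) (out : List (List String)) : Prop := out = compress_board_alt board map_board
instance (board : List (List String)) (map_board : List (List Int)) (out : List (List String)) : Decidable (Spec_compress_board board map_board out) := by unfold Spec_compress_board; infer_instance

-- ===== CLAIM (what is proved, stated in full; the proofs are below) =====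
def Claim_equal_compress_board : Prop := ∀ (board : List (List String)) (map_board : List (List Int)), Dom_compress_board board map_board → Pre_compress_board board map_board → Spec_compress_board board map_board (compress_board board map_board)

-- ===== LEMMAS AND PROOFS =====

-- column j of a board
def pvCol (b : List (List String)) (j : Nat) : List String := b.map (fun r => r.getD j "")

-- the mark at (i, j)
def pvMk (mb : List (List Int)) (i j : Nat) : Int := (mb.getD i []).getD j 0

-- effect of one marked cell at row i on its column: drop c[i], shift the rows above down, "X" on top
def pvColProc (c : List String) (i : Nat) : List String := "X" :: (c.take i ++ c.drop (i+1))

def pvColStep (mb : List (List Int)) (j : Nat) (c : List String) (i : Nat) : List String :=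
  if pvMk mb i j = 1 then pvColProc c i else c

-- the pure-column version of pvShift
def pvColShift : Nat → List String → List String
  | 0, c => c
  | x+1, c => pvColShift x ((c.set (x+1) (c.getD x "")).set x "X")

-- board shape: length m, every row length n
def pvShape (m n : Nat) (b : List (List String)) : Prop :=
  b.length = m ∧ ∀ r ∈ b, r.length = n

theorem pvGetD_eq {α : Type} (l : List α) (i : Nat) (d : α) (h : i < l.length) :
    l.getD i d = l[i] := by
  simp [List.getD, List.getElem?_eq_getElem h]

theorem pvDropSet {α : Type} (l : List α) (n : Nat) (v : α) (h : n < l.length) :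
    (l.set n v).drop n = v :: l.drop (n+1) := by
  induction l generalizing n with
  | nil => simp at h
  | cons a t ih =>
    cases n with
    | zero => simp
    | succ n => simpa using ih n (by simpa using h)

theorem pvSetCell_shape {m n : Nat} {b : List (List String)} (h : pvShape m n b)
    (i j : Nat) (v : String) : pvShape m n (pvSetCell b i j v) := by
  by_cases hi : i < b.length
  · refine ⟨by simp [pvSetCell, h.1], ?_⟩
    intro r hr
    rcases List.mem_or_eq_of_mem_set hr with h' | h'
    · exact h.2 r h'
    · subst h'
      rw [List.length_set, pvGetD_eq b i [] hi]
      exact h.2 _ (List.getElem_mem hi)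
  · rw [pvSetCell, List.set_eq_of_length_le (Nat.le_of_not_lt hi)]
    exact h

theorem pvShift_shape {m n : Nat} {j : Nat} :
    ∀ (x : Nat) {b : List (List String)}, pvShape m n b → pvShape m n (pvShift j x b) := by
  intro x
  induction x with
  | zero => intro b h; simpa [pvShift] using h
  | succ x ih =>
    intro b h
    simp only [pvShift]
    exact ih (pvSetCell_shape (pvSetCell_shape h _ _ _) _ _ _)

theorem pvCellStep_shape {m n : Nat} {b : List (List String)} (h : pvShape m n b)
    (mb : List (List Int)) (i j : Nat) : pvShape m n (pvCellStep mb i j b) := by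
  unfold pvCellStep
  split
  · split
    · exact pvSetCell_shape h 0 j "X"
    · exact pvShift_shape i h
  · exact h

theorem pvGetDSetSelf {α : Type} (l : List α) (i : Nat) (v d : α) (h : i < l.length) :
    (l.set i v).getD i d = v := by
  simp [List.getD, h]

theorem pvCol_setCell_self {m n : Nat} {b : List (List String)} (h : pvShape m n b)
    {i j : Nat} (hi : i < m) (hj : j < n) (v : String) :
    pvCol (pvSetCell b i j v) j = (pvCol b j).set i v := by
  have hib : i < b.length := by rw [h.1]; exact hi
  have hrowlen : j < (b.getD i []).length := by
    rw [pvGetD_eq b i [] hib, h.2 _ (List.getElem_mem hib)]; exact hj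
  unfold pvCol pvSetCell
  rw [List.map_set]
  congr 1
  exact pvGetDSetSelf _ j v "" hrowlen

theorem pvCol_setCell_ne {b : List (List String)} {j j' : Nat} (hne : j' ≠ j)
    (i : Nat) (v : String) : pvCol (pvSetCell b i j v) j' = pvCol b j' := by
  by_cases hi : i < b.length
  · unfold pvCol pvSetCell
    rw [List.map_set]
    have h1 : ((b.getD i []).set j v).getD j' "" = (b.getD i []).getD j' "" := by
      simp [List.getD, List.getElem?_set_ne (Ne.symm hne)]
    have hi' : i < (b.map (fun r => r.getD j' "")).length := by simpa using hi
    have h2 : (b.getD i []).getD j' "" = (b.map (fun r => r.getD j' ""))[i]'hi' := by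
      simp [List.getD, List.getElem?_eq_getElem hi]
    rw [h1, h2, List.set_getElem_self]
  · rw [pvSetCell, List.set_eq_of_length_le (Nat.le_of_not_lt hi)]

theorem pvGetCell_col (b : List (List String)) (i j : Nat) (hi : i < b.length) :
    pvGetCell b i j = (pvCol b j).getD i "" := by
  simp [pvGetCell, pvCol, List.getD, List.getElem?_eq_getElem hi]

theorem pvShift_col_self {m n : Nat} {j : Nat} (hj : j < n) :
    ∀ (x : Nat) {b : List (List String)}, pvShape m n b → x < m →
      pvCol (pvShift j x b) j = pvColShift x (pvCol b j) := by
  intro x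
  induction x with
  | zero => intro b _ _; simp [pvShift, pvColShift]
  | succ x ih =>
    intro b h hx
    have hxm : x < m := Nat.lt_of_succ_lt hx
    have hb1 := pvSetCell_shape h (x+1) j (pvGetCell b x j)
    have hb2 := pvSetCell_shape hb1 x j "X"
    simp only [pvShift]
    rw [ih hb2 hxm]
    simp only [pvColShift]
    congr 1
    rw [pvCol_setCell_self hb1 hxm hj, pvCol_setCell_self h hx hj,
        pvGetCell_col b x j (by rw [h.1]; exact hxm)]

theorem pvShift_col_ne {j j' : Nat} (hne : j' ≠ j) :
    ∀ (x : Nat) (b : List (List String)), pvCol (pvShift j x b) j' = pvCol b j' := by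
  intro x
  induction x with
  | zero => intro b; simp [pvShift]
  | succ x ih =>
    intro b
    simp only [pvShift]
    rw [ih, pvCol_setCell_ne hne, pvCol_setCell_ne hne]

theorem pvColShift_eq : ∀ (x : Nat) (c : List String), 1 ≤ x → x < c.length →
    pvColShift x c = "X" :: (c.take x ++ c.drop (x+1)) := by
  intro x
  induction x with
  | zero => intro c h1 _; omega
  | succ x ih =>
    intro c _ hx
    rcases Nat.eq_zero_or_pos x with h0 | h1
    · subst h0
      cases c with
      | nil => simp at hx
      | cons a t =>
        cases t with
        | nil => simp at hx
        | cons b t => simp [pvColShift, List.getD, List.set]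
    · have hx' : x < c.length := Nat.lt_of_succ_lt hx
      simp only [pvColShift]
      set c' := (c.set (x+1) (c.getD x "")).set x "X" with hc'
      have hlen : c'.length = c.length := by simp [hc']
      rw [ih c' h1 (by rw [hlen]; exact hx')]
      have htake : c'.take x = c.take x := by
        rw [hc', List.take_set_of_le (Nat.le_refl x), List.take_set_of_le (by omega)]
      have hdrop : c'.drop (x+1) = c.getD x "" :: c.drop (x+2) := by
        rw [hc', List.drop_set_of_lt (by omega)]
        exact pvDropSet c (x+1) _ hx
      rw [htake, hdrop]
      have htk : c.take (x+1) = c.take x ++ [c.getD x ""] := by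
        rw [List.take_add_one, List.getElem?_eq_getElem hx', pvGetD_eq c x "" hx']
        simp
      rw [htk]
      simp

theorem pvCellStep_col_self {m n : Nat} {b : List (List String)} (h : pvShape m n b)
    (mb : List (List Int)) {i j : Nat} (hi : i < m) (hj : j < n) :
    pvCol (pvCellStep mb i j b) j = pvColStep mb j (pvCol b j) i := by
  have hcl : (pvCol b j).length = m := by simp [pvCol, h.1]
  unfold pvCellStep pvColStep pvMk
  by_cases hmk : (mb.getD i []).getD j 0 = 1
  · rw [if_pos hmk, if_pos hmk]
    by_cases hi0 : i = 0
    · subst hi0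
      rw [if_pos rfl, pvCol_setCell_self h hi hj]
      cases hc : pvCol b j with
      | nil => rw [hc] at hcl; simp at hcl; omega
      | cons a t => simp [pvColProc]
    · rw [if_neg hi0, pvShift_col_self hj i h hi,
          pvColShift_eq i _ (by omega) (by omega)]
      rfl
  · rw [if_neg hmk, if_neg hmk]

theorem pvCellStep_col_ne (mb : List (List Int)) {i j j' : Nat} (hne : j' ≠ j)
    (b : List (List String)) : pvCol (pvCellStep mb i j b) j' = pvCol b j' := by
  unfold pvCellStep
  split
  · split
    · exact pvCol_setCell_ne hne 0 "X"
    · exact pvShift_col_ne hne i b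
  · rfl

theorem pvFoldl_shape {m n : Nat} (mb : List (List Int)) (i : Nat) :
    ∀ (L : List Nat) {b : List (List String)}, pvShape m n b →
      pvShape m n (L.foldl (fun b j => pvCellStep mb i j b) b) := by
  intro L
  induction L with
  | nil => intro b h; exact h
  | cons a L ih => intro b h; exact ih (pvCellStep_shape h mb i a)

theorem pvFoldl_col_ne (mb : List (List Int)) (i j : Nat) :
    ∀ (L : List Nat), (∀ j' ∈ L, j' ≠ j) → ∀ (b : List (List String)),
      pvCol (L.foldl (fun b j' => pvCellStep mb i j' b) b) j = pvCol b j := by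
  intro L
  induction L with
  | nil => intro _ b; rfl
  | cons a L ih =>
    intro hL b
    simp only [List.foldl_cons]
    rw [ih (fun j' h' => hL j' (List.mem_cons_of_mem a h')) _,
        pvCellStep_col_ne mb (Ne.symm (hL a (List.mem_cons_self))) b]

theorem pvInnerFold_col {m n : Nat} {b : List (List String)} (h : pvShape m n b)
    (mb : List (List Int)) {i j : Nat} (hi : i < m) (hj : j < n) :
    pvCol ((List.range n).foldl (fun b j' => pvCellStep mb i j' b) b) j
      = pvColStep mb j (pvCol b j) i := by
  have hdecomp : List.range n = (List.range j ++ [j]) ++ (List.range (n - (j+1))).map ((j+1) + ·) := by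
    rw [← List.range_succ, ← List.range_add]
    congr 1
    omega
  rw [hdecomp, List.foldl_append, List.foldl_append]
  rw [pvFoldl_col_ne mb i j _ (by
        intro j' hj'
        simp only [List.mem_map, List.mem_range] at hj'
        obtain ⟨a, _, rfl⟩ := hj'
        omega) _]
  simp only [List.foldl_cons, List.foldl_nil]
  rw [pvCellStep_col_self (pvFoldl_shape mb i (List.range j) h) mb hi hj,
      pvFoldl_col_ne mb i j (List.range j) (by intro j' hj'; simp at hj'; omega) b]

-- values kept in column j among the first t rows
def pvKept (board : List (List String)) (mb : List (List Int)) (t j : Nat) : List String :=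
  ((List.range t).filter (fun i => pvMk mb i j ≠ 1)).map (fun i => (pvCol board j).getD i "")

theorem pvKept_len_le (board : List (List String)) (mb : List (List Int)) (t j : Nat) :
    (pvKept board mb t j).length ≤ t := by
  simp only [pvKept, List.length_map]
  exact le_trans (List.length_filter_le _ _) (by simp)

theorem pvColFold_eq {board : List (List String)} (mb : List (List Int)) (j : Nat) :
    ∀ (t : Nat), t ≤ board.length →
    (List.range t).foldl (pvColStep mb j) (pvCol board j)
      = List.replicate (t - (pvKept board mb t j).length) "X" ++ pvKept board mb t j
          ++ (pvCol board j).drop t := by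
  intro t
  induction t with
  | zero => intro _; simp [pvKept]
  | succ t ih =>
    intro ht
    have ht' : t ≤ board.length := by omega
    have hclen : (pvCol board j).length = board.length := by simp [pvCol]
    have htc : t < (pvCol board j).length := by omega
    set cl := pvCol board j with hc
    set K := pvKept board mb t j with hK
    have hKle : K.length ≤ t := pvKept_len_le board mb t j
    have hrepl : (List.replicate (t - K.length) "X" ++ K).length = t := by simp; omega
    rw [List.range_succ, List.foldl_append, ih ht']
    simp only [List.foldl_cons, List.foldl_nil]
    have hdropt : cl.drop t = cl[t]'htc :: cl.drop (t+1) := List.drop_eq_getElem_cons htc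
    simp only [pvColStep]
    by_cases hm : pvMk mb t j = 1
    · rw [if_pos hm]
      have hkept1 : pvKept board mb (t+1) j = K := by
        rw [hK, pvKept, pvKept, List.range_succ, List.filter_append]
        simp [hm]
      have e1 : (List.replicate (t - K.length) "X" ++ K ++ cl.drop t).take t
          = List.replicate (t - K.length) "X" ++ K := List.take_left' hrepl
      have e2 : (List.replicate (t - K.length) "X" ++ K ++ cl.drop t).drop (t+1)
          = cl.drop (t+1) := by
        have h1 : (List.replicate (t - K.length) "X" ++ K ++ cl.drop t).drop t = cl.drop t :=
          List.drop_left' hrepl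
        have h2 : (List.replicate (t - K.length) "X" ++ K ++ cl.drop t).drop (t+1)
            = ((List.replicate (t - K.length) "X" ++ K ++ cl.drop t).drop t).drop 1 := by
          rw [List.drop_drop]
        rw [h2, h1, hdropt]
        simp
      simp only [pvColProc]
      rw [e1, e2, hkept1]
      rw [show t + 1 - K.length = (t - K.length) + 1 by omega, List.replicate_succ]
      simp
    · rw [if_neg hm]
      have hkept1 : pvKept board mb (t+1) j = K ++ [cl.getD t ""] := by
        rw [hK, pvKept, pvKept, List.range_succ, List.filter_append]
        simp [hm, ← hc]
      rw [hkept1, hdropt]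
      have hgd : cl.getD t "" = cl[t]'htc := pvGetD_eq cl t "" htc
      rw [show t + 1 - (K ++ [cl.getD t ""]).length = t - K.length by simp, hgd]
      simp

theorem pvAltKept_eq (board : List (List String)) (mb : List (List Int)) (m j : Nat)
    (hm : m ≤ board.length) : pvAltKept board mb m j = pvKept board mb m j := by
  unfold pvAltKept pvKept pvMk
  apply List.map_congr_left
  intro i hi
  have him : i < board.length := by
    have := List.mem_range.mp (List.mem_of_mem_filter hi)
    omega
  exact pvGetCell_col board i j him

theorem pvOuterFold {board : List (List String)} (mb : List (List Int))
    (hrows : ∀ r ∈ board, r.length = board.headI.length) :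
    ∀ (t : Nat), t ≤ board.length →
    pvShape board.length board.headI.length
      ((List.range t).foldl
        (fun b i => (List.range board.headI.length).foldl (fun b j => pvCellStep mb i j b) b)
        board)
    ∧ ∀ j < board.headI.length,
      pvCol ((List.range t).foldl
        (fun b i => (List.range board.headI.length).foldl (fun b j => pvCellStep mb i j b) b)
        board) j
      = (List.range t).foldl (pvColStep mb j) (pvCol board j) := by
  intro t
  induction t with
  | zero => intro _; exact ⟨⟨rfl, hrows⟩, fun j _ => rfl⟩
  | succ t ih =>
    intro ht
    obtain ⟨hsh, hcol⟩ := ih (by omega)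
    rw [List.range_succ]
    simp only [List.foldl_append, List.foldl_cons, List.foldl_nil]
    refine ⟨pvFoldl_shape mb t _ hsh, ?_⟩
    intro j hj
    rw [pvInnerFold_col hsh mb (by omega) hj, hcol j hj]

-- ===== VERDICT (by name: the statement is the Claim_ definition above) =====
theorem compress_board_spec : Claim_equal_compress_board := by
  intro board mb _ hpre
  unfold Spec_compress_board
  obtain ⟨-, hrows, -, -⟩ := hpre
  simp only [compress_board, compress_board_alt]
  have hout := pvOuterFold mb hrows board.length (Nat.le_refl _)
  set A := (List.range board.length).foldl
      (fun b i => (List.range board.headI.length).foldl (fun b j => pvCellStep mb i j b) b)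
      board with hA
  obtain ⟨⟨hAlen, hArows⟩, hAcol⟩ := hout
  have hcolA : ∀ j, j < board.headI.length →
      pvCol A j = List.replicate (board.length - (pvKept board mb board.length j).length) "X"
        ++ pvKept board mb board.length j := by
    intro j hj
    rw [hAcol j hj, pvColFold_eq mb j board.length (Nat.le_refl _)]
    have hdr : (pvCol board j).drop board.length = [] :=
      List.drop_eq_nil_of_le (by simp [pvCol])
    rw [hdr, List.append_nil]
  apply List.ext_getElem
  · rw [hAlen]; simp
  · intro i h1 h2
    rw [List.getElem_map, List.getElem_range]
    apply List.ext_getElem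
    · rw [hArows _ (List.getElem_mem h1)]; simp
    · intro j hj1 hj2
      have hjn : j < board.headI.length := by
        rw [hArows _ (List.getElem_mem h1)] at hj1; exact hj1
      rw [List.getElem_map, List.getElem_range]
      have h5 : (pvCol A j).getD i "" = A[i][j] := by
        rw [pvGetD_eq _ i "" (by simpa [pvCol] using h1)]
        simp only [pvCol, List.getElem_map]
        exact pvGetD_eq _ j "" hj1
      rw [← h5, hcolA j hjn]
      rw [pvGetD_eq _ j ([] : List String) (by simp [hjn])]
      rw [List.getElem_map, List.getElem_range]
      rw [pvAltKept_eq board mb board.length j (Nat.le_refl _)]
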